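-- pv_equiv track=rewrite | github.com/EdwardZehuaZhang/3d-printing-monorepo | rhino8-internal-wire/actual pluggin folder/rh8/libs/UNNcBibN/wire_router/core.py | _remove_path_reversals
-- ===== SOURCE A (Python) =====
-- from typing import Dict, FrozenSet, Iterable, Iterator, List, Optional, Sequence, Set, Tuple
--
-- GridIndex = Tuple[int, int, int]
--
-- def _remove_path_reversals(path: List[GridIndex]) -> List[GridIndex]:
--     """Remove loops where the path revisits an earlier cell.
--
--     When cell ``path[j]`` equals ``path[i]`` (with ``j > i``), the sub-path
--     ``path[i+1 : j]`` is a loop/spur.  We keep the first visit and skip to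
--     the second, effectively short-circuiting the reversal.
--     """
--     if len(path) <= 2:
--         return list(path)
--
--     cleaned: List[GridIndex] = []
--     seen: Dict[GridIndex, int] = {}
--     index = 0
--     while index < len(path):
--         cell = path[index]
--         if cell in seen:
--             # Trim back to the first occurrence and continue from here.
--             trim_to = seen[cell]
--             cleaned = cleaned[: trim_to + 1]
--             # Rebuild the lookup to match the trimmed list.
--             seen = {c: i for i, c in enumerate(cleaned)}
--         else:
--             cleaned.append(cell)
--             seen[cell] = len(cleaned) - 1
--         index += 1
--     return cleaned
-- ===== SOURCE B (Python) =====
-- from typing import Dict, List, Optional, Tuple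
--
-- GridIndex = Tuple[int, int, int]
--
-- def _remove_path_reversals(path: List[GridIndex]) -> List[GridIndex]:
--     """Fixpoint form: repeatedly delete the earliest revisit loop until none remains."""
--     if len(path) <= 2:
--         return list(path)
--     result = list(path)
--     while True:
--         pos: Dict[GridIndex, int] = {}
--         hit: Optional[Tuple[int, int]] = None
--         for j, cell in enumerate(result):
--             if cell in pos:
--                 hit = (pos[cell], j)
--                 break
--             pos[cell] = j
--         if hit is None:
--             return result
--         i, j = hit
--         del result[i + 1 : j + 1]
-- ===== Notes on version B (the rewrite author's own statement) =====
-- stated objective: alternative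
-- what changed: A does one left-to-right pass keeping a growing cleaned-stack plus a seen-index dict that it trims and rebuilds at each revisit; B instead runs a fixpoint loop on the whole list: scan for the earliest repeated cell, splice out the loop segment path[i+1:j+1], and restart until a full scan finds no repeat.
import Mathlib
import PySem

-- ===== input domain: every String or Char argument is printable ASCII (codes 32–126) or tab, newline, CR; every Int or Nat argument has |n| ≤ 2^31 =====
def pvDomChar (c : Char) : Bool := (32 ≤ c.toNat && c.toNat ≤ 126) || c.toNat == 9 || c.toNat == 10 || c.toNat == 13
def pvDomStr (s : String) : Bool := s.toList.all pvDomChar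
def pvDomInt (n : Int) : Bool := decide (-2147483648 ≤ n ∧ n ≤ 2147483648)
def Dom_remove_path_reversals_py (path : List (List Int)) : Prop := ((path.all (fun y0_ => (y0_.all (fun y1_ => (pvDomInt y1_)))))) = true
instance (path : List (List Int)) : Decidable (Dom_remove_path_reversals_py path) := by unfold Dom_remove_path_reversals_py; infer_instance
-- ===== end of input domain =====

-- B replaces A's single-pass stack+dict trimming with a restart-on-earliest-repeat fixpoint
-- loop (objective: alternative decomposition, similar cost). Return values only: A copies the
-- input and never mutates it; both ports are pure.

-- ===== PORT A =====
-- seen = {c: i for i, c in enumerate(cleaned)}  (indices are the nonnegative Python ints; kept as Nat)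
def pvMkSeen (cleaned : List (List Int)) : PySem.Dict (List Int) Nat :=
  cleaned.zipIdx.foldl (fun d p => d.insert p.1 p.2) PySem.Dict.empty

-- the while loop over index/path[index], as structural recursion on the remaining suffix
def remove_path_reversals_go :
    List (List Int) → List (List Int) → PySem.Dict (List Int) Nat → List (List Int)
  | [], cleaned, _ => cleaned
  | cell :: rest, cleaned, seen =>
    match seen.get? cell with
    | some trim_to =>
      -- cleaned[: trim_to + 1] with trim_to ≥ 0 is exactly take (trim_to + 1)
      let cleaned' := cleaned.take (trim_to + 1)
      remove_path_reversals_go rest cleaned' (pvMkSeen cleaned')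
    | none =>
      let cleaned' := cleaned ++ [cell]
      remove_path_reversals_go rest cleaned' (seen.insert cell (cleaned'.length - 1))

def remove_path_reversals_py (path : List (List Int)) : List (List Int) :=
  if path.length ≤ 2 then path
  else remove_path_reversals_go path [] PySem.Dict.empty

-- ===== PORT B =====
-- the inner for-loop of Source B: scan with pos-dict, return the first (pos[cell], j) repeat
def pvFindRepGo :
    List (List Int) → PySem.Dict (List Int) Nat → Nat → Option (Nat × Nat)
  | [], _, _ => none
  | cell :: rest, pos, j =>
    match pos.get? cell with
    | some i => some (i, j)
    | none => pvFindRepGo rest (pos.insert cell j) (j + 1)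

def pvFindRep (l : List (List Int)) : Option (Nat × Nat) :=
  pvFindRepGo l PySem.Dict.empty 0

-- lemma the port needs for termination (del shortens the list)
theorem pvFindRepGo_bounds :
    ∀ (rest : List (List Int)) (pos : PySem.Dict (List Int) Nat) (j0 i j : Nat),
      (∀ c v, pos.get? c = some v → v < j0) →
      pvFindRepGo rest pos j0 = some (i, j) → i < j ∧ j < j0 + rest.length := by
  intro rest
  induction rest with
  | nil => intro pos j0 i j _ h; simp [pvFindRepGo] at h
  | cons cell rest ih =>
    intro pos j0 i j hinv h
    simp only [pvFindRepGo] at h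
    cases hg : pos.get? cell with
    | some i' =>
      rw [hg] at h; simp at h
      obtain ⟨rfl, rfl⟩ := h
      exact ⟨hinv _ _ hg, by simp⟩
    | none =>
      rw [hg] at h; simp at h
      have := ih (pos.insert cell j0) (j0 + 1) i j ?_ h
      · constructor
        · exact this.1
        · simpa [Nat.add_assoc, Nat.add_comm 1 rest.length] using this.2
      · intro c v hv
        by_cases hc : c = cell
        · subst hc; rw [PySem.Dict.get?_insert_self] at hv
          cases hv; omega
        · rw [PySem.Dict.get?_insert_of_ne _ _ hc] at hv
          exact Nat.lt_succ_of_lt (hinv _ _ hv)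

theorem pvFindRep_bounds {l : List (List Int)} {i j : Nat}
    (h : pvFindRep l = some (i, j)) : i < j ∧ j < l.length := by
  have := pvFindRepGo_bounds l PySem.Dict.empty 0 i j (by intro c v hv; simp [PySem.Dict.get?_empty] at hv) h
  simpa using this

-- while True: find the earliest repeat; if none return, else del result[i+1 : j+1] and restart
def pvBLoop (l : List (List Int)) : List (List Int) :=
  match h : pvFindRep l with
  | none => l
  | some (i, j) =>
    -- del result[i+1 : j+1] = take (i+1) ++ drop (j+1)  (indices nonnegative, in range)
    pvBLoop (l.take (i + 1) ++ l.drop (j + 1))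
termination_by l.length
decreasing_by
  have hb := pvFindRep_bounds h
  simp [List.length_take, List.length_drop]
  omega

def remove_path_reversals_py_alt (path : List (List Int)) : List (List Int) :=
  if path.length ≤ 2 then path
  else pvBLoop path

-- ===== PRECONDITION & SPEC =====
def Spec_remove_path_reversals_py (path : List (List Int)) (out : List (List Int)) : Prop := out = remove_path_reversals_py_alt path
instance (path : List (List Int)) (out : List (List Int)) : Decidable (Spec_remove_path_reversals_py path out) := by unfold Spec_remove_path_reversals_py; infer_instance

-- ===== CLAIM (what is proved, stated in full; the proofs are below) =====
def Claim_equal_remove_path_reversals_py : Prop := ∀ (path : List (List Int)), Dom_remove_path_reversals_py path → Spec_remove_path_reversals_py path (remove_path_reversals_py path)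

-- ===== LEMMAS AND PROOFS =====

theorem pvMkSeen_snoc (l : List (List Int)) (x : List Int) :
    pvMkSeen (l ++ [x]) = (pvMkSeen l).insert x l.length := by
  simp [pvMkSeen, List.zipIdx_append, List.foldl_append]

theorem pvMkSeen_get? (l : List (List Int)) (hnd : l.Nodup) (c : List Int) :
    (pvMkSeen l).get? c = PySem.List.index? l c := by
  induction l using List.reverseRecOn with
  | nil => simp [pvMkSeen, PySem.Dict.get?_empty, PySem.List.index?]
  | append_singleton l x ih =>
    have hndl : l.Nodup := hnd.sublist (by simp)
    have hx : x ∉ l := by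
      intro hm
      have := List.disjoint_of_nodup_append hnd
      exact this hm (by simp)
    rw [pvMkSeen_snoc]
    by_cases hc : c = x
    · subst hc
      rw [PySem.Dict.get?_insert_self, PySem.List.index?_append_singleton_self _ _ hx]
    · rw [PySem.Dict.get?_insert_of_ne _ _ hc, ih hndl]
      by_cases hm : c ∈ l
      · rw [PySem.List.index?_append_of_mem _ hm]
      · rw [(PySem.List.index?_eq_none_iff _ _).mpr hm,
            (PySem.List.index?_eq_none_iff _ _).mpr (by simp [hm, hc])]

theorem pvFindRepGo_prefix :
    ∀ (pre rest pre0 : List (List Int)), (pre0 ++ pre).Nodup →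
      pvFindRepGo (pre ++ rest) (pvMkSeen pre0) pre0.length
        = pvFindRepGo rest (pvMkSeen (pre0 ++ pre)) (pre0 ++ pre).length := by
  intro pre
  induction pre with
  | nil => intro rest pre0 _; simp
  | cons cell pre ih =>
    intro rest pre0 hnd
    have hnd0 : pre0.Nodup := hnd.sublist (by simp)
    have hcell : cell ∉ pre0 := by
      intro hm
      have := List.disjoint_of_nodup_append hnd
      exact this hm (by simp)
    simp only [List.cons_append, pvFindRepGo]
    rw [pvMkSeen_get? pre0 hnd0, (PySem.List.index?_eq_none_iff _ _).mpr hcell]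
    have h1 : (pvMkSeen pre0).insert cell pre0.length = pvMkSeen (pre0 ++ [cell]) :=
      (pvMkSeen_snoc pre0 cell).symm
    have h2 : pre0.length + 1 = (pre0 ++ [cell]).length := by simp
    rw [h1, h2, ih rest (pre0 ++ [cell]) (by simpa using hnd)]
    simp

theorem pvFindRep_none (l : List (List Int)) (hnd : l.Nodup) : pvFindRep l = none := by
  have := pvFindRepGo_prefix l [] [] (by simpa using hnd)
  simpa [pvFindRep, pvMkSeen, pvFindRepGo] using this

theorem pvFindRep_hit (cleaned : List (List Int)) (cell : List Int)
    (rest : List (List Int)) (hnd : cleaned.Nodup) (i : Nat)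
    (hi : PySem.List.index? cleaned cell = some i) :
    pvFindRep (cleaned ++ cell :: rest) = some (i, cleaned.length) := by
  have := pvFindRepGo_prefix cleaned (cell :: rest) [] (by simpa using hnd)
  simp only [List.nil_append, List.length_nil] at this
  unfold pvFindRep
  rw [show PySem.Dict.empty = pvMkSeen ([] : List (List Int)) from rfl, this]
  simp only [pvFindRepGo]
  rw [pvMkSeen_get? cleaned hnd, hi]

theorem pvBLoop_nodup (l : List (List Int)) (hnd : l.Nodup) : pvBLoop l = l := by
  rw [pvBLoop]
  split
  · rfl
  · rename_i i j h
    rw [pvFindRep_none l hnd] at h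
    exact absurd h (by simp)

theorem pvBLoop_hit (cleaned : List (List Int)) (cell : List Int)
    (rest : List (List Int)) (hnd : cleaned.Nodup) (i : Nat)
    (hi : PySem.List.index? cleaned cell = some i) :
    pvBLoop (cleaned ++ cell :: rest) = pvBLoop (cleaned.take (i + 1) ++ rest) := by
  have hilt : i < cleaned.length := by
    obtain ⟨hk, _, _⟩ := PySem.List.getElem_of_index?_eq_some hi
    exact hk
  rw [pvBLoop]
  split
  · rename_i h
    rw [pvFindRep_hit cleaned cell rest hnd i hi] at h
    exact absurd h (by simp)
  · rename_i i' j' h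
    rw [pvFindRep_hit cleaned cell rest hnd i hi] at h
    simp only [Option.some.injEq, Prod.mk.injEq] at h
    obtain ⟨h1, h2⟩ := h
    subst h1; subst h2
    congr 1
    have ht : (cleaned ++ cell :: rest).take (i + 1) = cleaned.take (i + 1) :=
      List.take_append_of_le_length (by omega)
    have hd : (cleaned ++ cell :: rest).drop (cleaned.length + 1) = rest := by
      have : cleaned ++ cell :: rest = (cleaned ++ [cell]) ++ rest := by simp
      rw [this, show cleaned.length + 1 = (cleaned ++ [cell]).length by simp, List.drop_left]
    rw [ht, hd]

theorem pv_main (rest : List (List Int)) :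
    ∀ cleaned : List (List Int), cleaned.Nodup →
      remove_path_reversals_go rest cleaned (pvMkSeen cleaned) = pvBLoop (cleaned ++ rest) := by
  induction rest with
  | nil =>
    intro cleaned hnd
    simp [remove_path_reversals_go, pvBLoop_nodup cleaned hnd]
  | cons cell rest ih =>
    intro cleaned hnd
    simp only [remove_path_reversals_go]
    rw [pvMkSeen_get? cleaned hnd]
    cases hi : PySem.List.index? cleaned cell with
    | none =>
      show remove_path_reversals_go rest (cleaned ++ [cell])
          ((pvMkSeen cleaned).insert cell ((cleaned ++ [cell]).length - 1)) = _
      have hcell : cell ∉ cleaned := (PySem.List.index?_eq_none_iff _ _).mp hi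
      have hnd' : (cleaned ++ [cell]).Nodup := by
        simp [List.nodup_append, hnd]
        intro a ha he; exact hcell (he ▸ ha)
      have hlen : (cleaned ++ [cell]).length - 1 = cleaned.length := by simp
      rw [hlen, show (pvMkSeen cleaned).insert cell cleaned.length = pvMkSeen (cleaned ++ [cell])
          from (pvMkSeen_snoc cleaned cell).symm]
      rw [ih (cleaned ++ [cell]) hnd']
      simp
    | some i =>
      show remove_path_reversals_go rest (cleaned.take (i + 1)) (pvMkSeen (cleaned.take (i + 1))) = _
      have hnd' : (cleaned.take (i + 1)).Nodup := hnd.sublist (List.take_sublist _ _)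
      rw [ih (cleaned.take (i + 1)) hnd']
      exact (pvBLoop_hit cleaned cell rest hnd i hi).symm

-- ===== VERDICT (by name: the statement is the Claim_ definition above) =====
theorem remove_path_reversals_py_spec : Claim_equal_remove_path_reversals_py := by
  intro path _
  unfold Spec_remove_path_reversals_py remove_path_reversals_py remove_path_reversals_py_alt
  by_cases h : path.length ≤ 2
  · simp [h]
  · simp only [h, if_false]
    have := pv_main path [] List.nodup_nil
    simpa [pvMkSeen, List.zipIdx] using this
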